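/- GENERATED by tools/mkcompositions.py from design/units.gif.tsv (unit `DGifGetRecordType.COMPOSITION`) — do not edit.
   THE PROOF of the composition unit `DGifGetRecordType.COMPOSITION`: the 4 segments of `DGifGetRecordType` chain into its contract, by the theorem
   `Gif.Spec.DGifGetRecordType.compose` (proved next to the cut assertions). -/
import Gif.Spec.Units.DGifGetRecordType_COMPOSITION

/-- The segments of `DGifGetRecordType` compose into its contract. -/
theorem Gif.Spec.Proved.DGifGetRecordType_COMPOSITION_ok : Gif.Spec.DGifGetRecordType_COMPOSITION.Statement := by
  intro Lay _hLay μ _hμ u₀ h_DGifGetRecordType_P h_DGifGetRecordType_1 h_DGifGetRecordType_2 h_DGifGetRecordType_E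
  apply Gif.Spec.DGifGetRecordType.compose
  all_goals assumption
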